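-- pv_equiv track=rewrite | github.com/kon6443/Algorithms | Programmers/python/모의고사.py | solution
-- ===== SOURCE A (Python) =====
-- def solution(answers):
--     answer = []
--     student_answers = [
--         [1,2,3,4,5],
--         [2,1,2,3,2,4,2,5,],
--         [3,3,1,1,2,2,4,4,5,5]
--     ]
--     temp0 = temp1 = temp2 = 0
--     answer_sheet = [0,0,0]
--     for item in answers:
--         if item == student_answers[0][temp0%len(student_answers[0])]:
--             answer_sheet[0] += 1
--         temp0 +=1
--         if item == student_answers[1][temp1%len(student_answers[1])]:
--             answer_sheet[1] += 1
--         temp1 +=1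
--         if item == student_answers[2][temp2%len(student_answers[2])]:
--             answer_sheet[2] += 1
--         temp2 +=1
--     maxNum = max(answer_sheet)
--     for i in range(len(answer_sheet)):
--         if answer_sheet[i] == maxNum:
--             answer.append(i+1)
--     return answer
-- ===== SOURCE B (Python) =====
-- def solution(answers):
--     patterns = [
--         [1, 2, 3, 4, 5],
--         [2, 1, 2, 3, 2, 4, 2, 5],
--         [3, 3, 1, 1, 2, 2, 4, 4, 5, 5],
--     ]
--     PERIOD = 40  # lcm of the pattern lengths: every pattern repeats with period 40
--     # Bucket the answers once: hist[r][a] = how many positions i with i % 40 == r hold answer a.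
--     hist = [{} for _ in range(PERIOD)]
--     for i, a in enumerate(answers):
--         h = hist[i % PERIOD]
--         h[a] = h.get(a, 0) + 1
--     # Each student's score is read off the histogram in O(PERIOD), no second scan of answers.
--     scores = [sum(hist[r].get(pat[r % len(pat)], 0) for r in range(PERIOD)) for pat in patterns]
--     best = max(scores)
--     return [s + 1 for s in range(3) if scores[s] == best]
-- ===== Notes on version B (the rewrite author's own statement) =====
-- stated objective: alternative
-- what changed: B replaces A's fused per-answer pattern-comparison loop by a histogram algorithm: one bucketing pass builds hist[i % 40][a] counts (40 = lcm of the pattern periods) without ever looking at the patterns, then each student's score is read off the 40-entry histogram in constant work per pattern, followed by max and index selection.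
import Mathlib
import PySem

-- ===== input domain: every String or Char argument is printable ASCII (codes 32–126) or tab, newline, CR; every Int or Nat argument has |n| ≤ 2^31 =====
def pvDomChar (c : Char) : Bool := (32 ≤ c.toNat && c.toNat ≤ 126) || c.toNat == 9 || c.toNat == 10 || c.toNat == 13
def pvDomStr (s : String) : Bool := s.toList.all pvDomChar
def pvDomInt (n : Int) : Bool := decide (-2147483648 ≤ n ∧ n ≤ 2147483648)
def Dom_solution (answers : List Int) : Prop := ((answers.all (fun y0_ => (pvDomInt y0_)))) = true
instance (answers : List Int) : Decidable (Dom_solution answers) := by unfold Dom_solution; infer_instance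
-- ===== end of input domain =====

-- B replaces A's fused compare-per-pattern loop by a different algorithm: a bucketing pass
-- builds a 40-residue histogram of the answers (never reading the patterns), and scores are
-- then read off the histogram (objective: alternative).

-- ===== PORT A =====
-- literal transliteration of A: one fold over answers carrying the three index counters
-- and the mutated answer_sheet list, then max and an index loop appending i+1.
def solution (answers : List Int) : List Int :=
  let student_answers : List (List Int) :=
    [[1,2,3,4,5], [2,1,2,3,2,4,2,5], [3,3,1,1,2,2,4,4,5,5]]
  let st :=
    answers.foldl (fun (st : Int × Int × Int × List Int) item =>
      let t0 := st.1; let t1 := st.2.1; let t2 := st.2.2.1; let sheet := st.2.2.2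
      let p0 := PySem.List.pyGetD student_answers 0 []
      let sheet := if item = PySem.List.pyGetD p0 (PySem.Int.mod t0 (PySem.List.len p0)) 0
        then PySem.List.pySetD sheet 0 (PySem.List.pyGetD sheet 0 0 + 1) else sheet
      let t0 := t0 + 1
      let p1 := PySem.List.pyGetD student_answers 1 []
      let sheet := if item = PySem.List.pyGetD p1 (PySem.Int.mod t1 (PySem.List.len p1)) 0
        then PySem.List.pySetD sheet 1 (PySem.List.pyGetD sheet 1 0 + 1) else sheet
      let t1 := t1 + 1
      let p2 := PySem.List.pyGetD student_answers 2 []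
      let sheet := if item = PySem.List.pyGetD p2 (PySem.Int.mod t2 (PySem.List.len p2)) 0
        then PySem.List.pySetD sheet 2 (PySem.List.pyGetD sheet 2 0 + 1) else sheet
      let t2 := t2 + 1
      (t0, t1, t2, sheet)) (0, 0, 0, [0, 0, 0])
  let answer_sheet := st.2.2.2
  let maxNum := (PySem.List.max? answer_sheet (fun y => y)).getD 0
  (PySem.List.pyRange 0 (PySem.List.len answer_sheet) 1).foldl
    (fun answer i =>
      if PySem.List.pyGetD answer_sheet i 0 = maxNum then answer ++ [i + 1] else answer) []

-- ===== PORT B =====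
-- literal transliteration of B: one bucketing fold builds hist[i % 40][a] (a list of 40 dicts),
-- scores are read off the histogram per pattern, then max and index selection.
def solution_alt (answers : List Int) : List Int :=
  let patterns : List (List Int) :=
    [[1,2,3,4,5], [2,1,2,3,2,4,2,5], [3,3,1,1,2,2,4,4,5,5]]
  let PERIOD : Int := 40
  let hist0 : List (PySem.Dict Int Int) :=
    (PySem.List.pyRange 0 PERIOD 1).map (fun _ => PySem.Dict.empty)
  let hist := (PySem.List.enumerate answers 0).foldl (fun hs p =>
      let r := PySem.Int.mod p.1 PERIOD
      let h := PySem.List.pyGetD hs r PySem.Dict.empty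
      PySem.List.pySetD hs r (PySem.Dict.insert h p.2 (PySem.Dict.getD h p.2 0 + 1))) hist0
  let scores := patterns.map (fun pat =>
      ((PySem.List.pyRange 0 PERIOD 1).map (fun r =>
        PySem.Dict.getD (PySem.List.pyGetD hist r PySem.Dict.empty)
          (PySem.List.pyGetD pat (PySem.Int.mod r (PySem.List.len pat)) 0) 0)).sum)
  let best := (PySem.List.max? scores (fun y => y)).getD 0
  ((PySem.List.pyRange 0 3 1).filter (fun s => decide (PySem.List.pyGetD scores s 0 = best))).map
    (fun s => s + 1)

-- ===== PRECONDITION & SPEC =====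
def Spec_solution (answers : List Int) (out : List Int) : Prop := out = solution_alt answers
instance (answers : List Int) (out : List Int) : Decidable (Spec_solution answers out) := by
  unfold Spec_solution; infer_instance

-- ===== CLAIM =====
def Claim_equal_solution : Prop :=
  ∀ (answers : List Int), Dom_solution answers → Spec_solution answers (solution answers)

-- ===== LEMMAS AND PROOFS =====

-- score of pattern p on the answers xs when the first element of xs carries index n
def scoreF (p : List Int) (n : Int) : List Int → Int
  | [] => 0
  | a :: r =>
    (if a = PySem.List.pyGetD p (PySem.Int.mod n (PySem.List.len p)) 0 then (1 : Int) else 0)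
      + scoreF p (n + 1) r

-- A's loop body, definitionally equal to the lambda inside `solution`
def stepA (st : Int × Int × Int × List Int) (item : Int) : Int × Int × Int × List Int :=
  let student_answers : List (List Int) :=
    [[1,2,3,4,5], [2,1,2,3,2,4,2,5], [3,3,1,1,2,2,4,4,5,5]]
  let t0 := st.1; let t1 := st.2.1; let t2 := st.2.2.1; let sheet := st.2.2.2
  let p0 := PySem.List.pyGetD student_answers 0 []
  let sheet := if item = PySem.List.pyGetD p0 (PySem.Int.mod t0 (PySem.List.len p0)) 0
    then PySem.List.pySetD sheet 0 (PySem.List.pyGetD sheet 0 0 + 1) else sheet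
  let t0 := t0 + 1
  let p1 := PySem.List.pyGetD student_answers 1 []
  let sheet := if item = PySem.List.pyGetD p1 (PySem.Int.mod t1 (PySem.List.len p1)) 0
    then PySem.List.pySetD sheet 1 (PySem.List.pyGetD sheet 1 0 + 1) else sheet
  let t1 := t1 + 1
  let p2 := PySem.List.pyGetD student_answers 2 []
  let sheet := if item = PySem.List.pyGetD p2 (PySem.Int.mod t2 (PySem.List.len p2)) 0
    then PySem.List.pySetD sheet 2 (PySem.List.pyGetD sheet 2 0 + 1) else sheet
  let t2 := t2 + 1
  (t0, t1, t2, sheet)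

theorem stepA_eval (n c0 c1 c2 a : Int) :
    stepA (n, n, n, [c0, c1, c2]) a =
      (n + 1, n + 1, n + 1,
       [c0 + (if a = PySem.List.pyGetD [1,2,3,4,5] (PySem.Int.mod n (PySem.List.len [(1:Int),2,3,4,5])) 0 then 1 else 0),
        c1 + (if a = PySem.List.pyGetD [2,1,2,3,2,4,2,5] (PySem.Int.mod n (PySem.List.len [(2:Int),1,2,3,2,4,2,5])) 0 then 1 else 0),
        c2 + (if a = PySem.List.pyGetD [3,3,1,1,2,2,4,4,5,5] (PySem.Int.mod n (PySem.List.len [(3:Int),3,1,1,2,2,4,4,5,5])) 0 then 1 else 0)]) := by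
  simp only [stepA]
  have e0 : PySem.List.pyGetD [[(1:Int),2,3,4,5],[2,1,2,3,2,4,2,5],[3,3,1,1,2,2,4,4,5,5]] (0:Int) ([]:List Int) = [1,2,3,4,5] := by decide
  have e1 : PySem.List.pyGetD [[(1:Int),2,3,4,5],[2,1,2,3,2,4,2,5],[3,3,1,1,2,2,4,4,5,5]] (1:Int) ([]:List Int) = [2,1,2,3,2,4,2,5] := by decide
  have e2 : PySem.List.pyGetD [[(1:Int),2,3,4,5],[2,1,2,3,2,4,2,5],[3,3,1,1,2,2,4,4,5,5]] (2:Int) ([]:List Int) = [3,3,1,1,2,2,4,4,5,5] := by decide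
  rw [e0, e1, e2]
  split_ifs <;>
    simp [PySem.List.pySetD, PySem.List.pySet?, PySem.List.pyGetD, PySem.List.pyGet?, PySem.List.pyIdx?]

theorem foldA (xs : List Int) (n c0 c1 c2 : Int) :
    xs.foldl stepA (n, n, n, [c0, c1, c2]) =
      (n + xs.length, n + xs.length, n + xs.length,
        [c0 + scoreF [1,2,3,4,5] n xs,
         c1 + scoreF [2,1,2,3,2,4,2,5] n xs,
         c2 + scoreF [3,3,1,1,2,2,4,4,5,5] n xs]) := by
  induction xs generalizing n c0 c1 c2 with
  | nil => simp [scoreF]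
  | cons a r ih =>
    rw [List.foldl_cons, stepA_eval, ih]
    simp only [scoreF, List.length_cons, Prod.mk.injEq, List.cons.injEq]
    and_intros <;> push_cast <;> ring

-- B's bucketing loop body, definitionally equal to the lambda inside `solution_alt`
def histStep (hs : List (PySem.Dict Int Int)) (p : Int × Int) : List (PySem.Dict Int Int) :=
  let r := PySem.Int.mod p.1 40
  let h := PySem.List.pyGetD hs r PySem.Dict.empty
  PySem.List.pySetD hs r (PySem.Dict.insert h p.2 (PySem.Dict.getD h p.2 0 + 1))

-- the pattern value expected at (cyclic) position r
def keyOf (pat : List Int) (r : Int) : Int :=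
  PySem.List.pyGetD pat (PySem.Int.mod r (PySem.List.len pat)) 0

-- B's score read off a histogram state
def histSumS (pat : List Int) (hs : List (PySem.Dict Int Int)) : Int :=
  ((PySem.List.pyRange 0 40 1).map (fun r =>
    PySem.Dict.getD (PySem.List.pyGetD hs r PySem.Dict.empty) (keyOf pat r) 0)).sum

theorem pyRange40 : PySem.List.pyRange 0 40 1 = (List.range 40).map (fun k : Nat => (k : Int)) := by decide

theorem histSumS_finset (pat : List Int) (hs : List (PySem.Dict Int Int)) :
    histSumS pat hs = ∑ r ∈ Finset.range 40,
      PySem.Dict.getD (hs.getD r PySem.Dict.empty) (keyOf pat (r:Nat)) 0 := by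
  unfold histSumS
  rw [pyRange40, List.map_map]
  rw [List.map_congr_left (g := fun r : Nat =>
      PySem.Dict.getD (hs.getD r PySem.Dict.empty) (keyOf pat (r:Nat)) 0)
    (fun k _ => by simp [Function.comp, PySem.List.pyGetD_natCast])]
  rfl

theorem getD_set_eq {α : Type} (hs : List α) (k r : Nat) (h' d : α) (hk : k < hs.length) :
    (hs.set k h').getD r d = if r = k then h' else hs.getD r d := by
  by_cases h : r = k
  · subst h; simp [List.getD, hk]
  · simp [List.getD, List.getElem?_set_ne (fun he => h he.symm), h]

theorem keyOf_mod40 (pat : List Int) (hdvd : pat.length ∣ 40) (n : Nat) :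
    keyOf pat ((n % 40 : Nat) : Int) = keyOf pat (n : Int) := by
  unfold keyOf
  rw [PySem.List.len_eq]
  rw [PySem.Int.mod_natCast, PySem.Int.mod_natCast, Nat.mod_mod_of_dvd n hdvd]

theorem step_histSumS (pat : List Int) (hdvd : pat.length ∣ 40)
    (hs : List (PySem.Dict Int Int)) (hlen : hs.length = 40) (n : Nat) (a : Int) :
    histSumS pat (histStep hs ((n : Int), a)) =
      histSumS pat hs + (if a = keyOf pat (n : Int) then 1 else 0) := by
  have hk : n % 40 < 40 := Nat.mod_lt _ (by omega)
  have hmod : PySem.Int.mod ((n : Int)) 40 = ((n % 40 : Nat) : Int) := by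
    exact_mod_cast PySem.Int.mod_natCast n 40
  have hstep : histStep hs ((n : Int), a) =
      hs.set (n % 40)
        (PySem.Dict.insert (hs.getD (n % 40) PySem.Dict.empty) a
          (PySem.Dict.getD (hs.getD (n % 40) PySem.Dict.empty) a 0 + 1)) := by
    simp only [histStep]
    rw [hmod, PySem.List.pyGetD_natCast, PySem.List.pySetD_natCast]
  rw [hstep, histSumS_finset, histSumS_finset]
  have hterm : ∀ r ∈ Finset.range 40,
      PySem.Dict.getD
        ((hs.set (n % 40)
          (PySem.Dict.insert (hs.getD (n % 40) PySem.Dict.empty) a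
            (PySem.Dict.getD (hs.getD (n % 40) PySem.Dict.empty) a 0 + 1))).getD r PySem.Dict.empty)
        (keyOf pat (r:Nat)) 0 =
      PySem.Dict.getD (hs.getD r PySem.Dict.empty) (keyOf pat (r:Nat)) 0 +
        (if r = n % 40 then (if a = keyOf pat (n : Int) then (1:Int) else 0) else 0) := by
    intro r _
    rw [getD_set_eq _ _ _ _ _ (by omega)]
    by_cases hr : r = n % 40
    · subst hr
      rw [if_pos rfl, if_pos rfl, PySem.Dict.getD_insert, keyOf_mod40 pat hdvd n]
      by_cases ha : a = keyOf pat (n : Int)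
      · rw [if_pos ha.symm, if_pos ha, ha]
      · rw [if_neg (fun h => ha h.symm), if_neg ha, add_zero]
    · rw [if_neg hr, if_neg hr, add_zero]
  rw [Finset.sum_congr rfl hterm, Finset.sum_add_distrib]
  congr 1
  rw [Finset.sum_ite_eq' (Finset.range 40) (n % 40)
    (fun _ => if a = keyOf pat (n : Int) then (1:Int) else 0)]
  simp [hk]

theorem histStep_length (hs : List (PySem.Dict Int Int)) (p : Int × Int) :
    (histStep hs p).length = hs.length := by
  unfold histStep; exact PySem.List.length_pySetD _ _ _

theorem foldHist (pat : List Int) (hdvd : pat.length ∣ 40) (xs : List Int) :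
    ∀ (n : Nat) (hs : List (PySem.Dict Int Int)), hs.length = 40 →
    histSumS pat ((PySem.List.enumerate xs (n : Int)).foldl histStep hs) =
      histSumS pat hs + scoreF pat (n : Int) xs := by
  induction xs with
  | nil => intro n hs _; simp [PySem.List.enumerate_nil, scoreF]
  | cons a r ih =>
    intro n hs hlen
    rw [PySem.List.enumerate_cons, List.foldl_cons]
    have hcast : ((n : Int) + 1) = ((n + 1 : Nat) : Int) := by push_cast; ring
    rw [hcast, ih (n + 1) _ (by rw [histStep_length, hlen]), step_histSumS pat hdvd hs hlen]
    simp only [scoreF, keyOf]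
    push_cast
    ring_nf

-- initial histogram facts (concrete)
theorem hist0_len :
    ((PySem.List.pyRange 0 40 1).map
      (fun _ => (PySem.Dict.empty : PySem.Dict Int Int))).length = 40 := by decide

theorem finish_eq (s0 s1 s2 M : Int) :
    (PySem.List.pyRange 0 (PySem.List.len [s0,s1,s2]) 1).foldl
      (fun answer i => if PySem.List.pyGetD [s0,s1,s2] i 0 = M then answer ++ [i + 1] else answer) [] =
    ((PySem.List.pyRange 0 3 1).filter
      (fun s => decide (PySem.List.pyGetD [s0,s1,s2] s 0 = M))).map (fun s => s + 1) := by
  have hr : PySem.List.pyRange 0 (PySem.List.len [s0,s1,s2]) 1 = [0,1,2] := by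
    norm_num [PySem.List.len_eq]
    decide
  have hr3 : PySem.List.pyRange 0 (3:Int) 1 = [0,1,2] := by decide
  rw [hr, hr3]
  simp only [List.foldl_cons, List.foldl_nil, List.filter]
  simp [PySem.List.pyGetD, PySem.List.pyGet?, PySem.List.pyIdx?]
  split_ifs <;> simp [*]

-- ===== VERDICT (by name: the statement is the Claim_ definition above) =====
theorem solution_spec : Claim_equal_solution := by
  intro answers _
  unfold Spec_solution
  show solution answers = solution_alt answers
  have hA : solution answers =
      (PySem.List.pyRange 0
        (PySem.List.len ((answers.foldl stepA ((0:Int),(0:Int),(0:Int),([0,0,0]:List Int))).2.2.2)) 1).foldl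
        (fun answer i =>
          if PySem.List.pyGetD ((answers.foldl stepA ((0:Int),(0:Int),(0:Int),([0,0,0]:List Int))).2.2.2) i 0 =
              (PySem.List.max? ((answers.foldl stepA ((0:Int),(0:Int),(0:Int),([0,0,0]:List Int))).2.2.2)
                (fun y => y)).getD 0
          then answer ++ [i + 1] else answer) [] := rfl
  have hB : solution_alt answers =
      (let scores : List Int :=
        [histSumS [1,2,3,4,5] ((PySem.List.enumerate answers 0).foldl histStep
            ((PySem.List.pyRange 0 40 1).map (fun _ => (PySem.Dict.empty : PySem.Dict Int Int)))),
         histSumS [2,1,2,3,2,4,2,5] ((PySem.List.enumerate answers 0).foldl histStep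
            ((PySem.List.pyRange 0 40 1).map (fun _ => (PySem.Dict.empty : PySem.Dict Int Int)))),
         histSumS [3,3,1,1,2,2,4,4,5,5] ((PySem.List.enumerate answers 0).foldl histStep
            ((PySem.List.pyRange 0 40 1).map (fun _ => (PySem.Dict.empty : PySem.Dict Int Int))))]
       ((PySem.List.pyRange 0 3 1).filter
         (fun s => decide (PySem.List.pyGetD scores s 0 = (PySem.List.max? scores (fun y => y)).getD 0))).map
         (fun s => s + 1)) := rfl
  rw [hA, hB]
  have hs0 : ∀ pat : List Int, pat.length ∣ 40 → histSumS pat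
      ((PySem.List.enumerate answers 0).foldl histStep
        ((PySem.List.pyRange 0 40 1).map (fun _ => (PySem.Dict.empty : PySem.Dict Int Int)))) =
      histSumS pat ((PySem.List.pyRange 0 40 1).map (fun _ => (PySem.Dict.empty : PySem.Dict Int Int)))
        + scoreF pat 0 answers := by
    intro pat hdvd
    simpa using foldHist pat hdvd answers 0 _ hist0_len
  simp only [hs0 [1,2,3,4,5] (by decide), hs0 [2,1,2,3,2,4,2,5] (by decide),
      hs0 [3,3,1,1,2,2,4,4,5,5] (by decide)]
  have he0 : histSumS [1,2,3,4,5]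
      ((PySem.List.pyRange 0 40 1).map (fun _ => (PySem.Dict.empty : PySem.Dict Int Int))) = 0 := by decide
  have he1 : histSumS [2,1,2,3,2,4,2,5]
      ((PySem.List.pyRange 0 40 1).map (fun _ => (PySem.Dict.empty : PySem.Dict Int Int))) = 0 := by decide
  have he2 : histSumS [3,3,1,1,2,2,4,4,5,5]
      ((PySem.List.pyRange 0 40 1).map (fun _ => (PySem.Dict.empty : PySem.Dict Int Int))) = 0 := by decide
  rw [he0, he1, he2]
  simp only [foldA answers 0 0 0 0, zero_add]
  exact finish_eq _ _ _ _
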